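-- pv_equiv track=rewrite | github.com/finstats99/mini_proj_strmlit | pages/jh_hoddle.py | build_user_intents
-- ===== SOURCE A (Python) =====
-- def build_user_intents(user_text, intent_dict):
--     u = str(user_text)
--     d = {}
--     for intent, kws in intent_dict.items():
--         cnt = 0
--         for k in kws:
--             if k in u:
--                 cnt += 1
--         d[intent] = cnt
--     return d
-- ===== SOURCE B (Python) =====
-- def build_user_intents(user_text, intent_dict):
--     u = str(user_text)
--     n = len(u)
--     lengths = {len(k) for kws in intent_dict.values() for k in kws}
--     subs = {u[i:i+L] for L in lengths for i in range(n - L + 1)}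
--     d = {}
--     for intent, kws in intent_dict.items():
--         d[intent] = sum(k in subs for k in kws)
--     return d
-- ===== Notes on version B (the rewrite author's own statement) =====
-- stated objective: faster
-- what changed: Instead of scanning the whole text once per keyword, B precomputes one set of all substrings of the text whose lengths occur among the keywords and answers each keyword by a single hash-set lookup.
import Mathlib
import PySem

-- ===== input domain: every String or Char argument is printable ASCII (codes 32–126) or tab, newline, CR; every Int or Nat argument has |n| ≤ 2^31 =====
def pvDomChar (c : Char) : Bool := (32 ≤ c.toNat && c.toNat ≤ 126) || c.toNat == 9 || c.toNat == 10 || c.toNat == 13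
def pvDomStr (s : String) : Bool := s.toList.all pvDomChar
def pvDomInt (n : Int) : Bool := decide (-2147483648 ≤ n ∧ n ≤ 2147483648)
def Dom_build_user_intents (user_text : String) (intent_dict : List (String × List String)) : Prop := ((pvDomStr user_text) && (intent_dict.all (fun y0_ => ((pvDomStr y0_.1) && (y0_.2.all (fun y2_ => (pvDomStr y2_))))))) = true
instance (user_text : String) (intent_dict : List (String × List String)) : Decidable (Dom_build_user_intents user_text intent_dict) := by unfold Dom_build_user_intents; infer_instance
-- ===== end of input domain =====

-- B replaces the per-keyword substring scan of the text by one precomputed set of the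
-- text's substrings of the keywords' lengths, looked up per keyword (objective: alternative).

-- ===== PORT A =====
def build_user_intents (user_text : String) (intent_dict : List (String × List String)) : List (String × Int) :=
  let u := user_text
  let d : PySem.Dict String Int :=
    intent_dict.foldl (fun d p =>
      let cnt := p.2.foldl (fun cnt k => if PySem.Str.isIn k u then cnt + 1 else cnt) (0 : Int)
      d.insert p.1 cnt) PySem.Dict.empty
  d.items

-- ===== PORT B =====
def build_user_intents_alt (user_text : String) (intent_dict : List (String × List String)) : List (String × Int) :=
  let u := user_text
  let n : Int := PySem.Str.len u
  let lengths : PySem.Set Int :=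
    PySem.Set.ofList (intent_dict.flatMap (fun p => p.2.map (fun k => PySem.Str.len k)))
  let subs : PySem.Set String :=
    PySem.Set.ofList (lengths.flatMap (fun L =>
      (PySem.List.pyRange 0 (n - L + 1) 1).map (fun i => PySem.Str.slice u (some i) (some (i + L)))))
  let d : PySem.Dict String Int :=
    intent_dict.foldl (fun d p =>
      d.insert p.1 (p.2.foldl (fun acc k => acc + (if PySem.Set.contains subs k then (1 : Int) else 0)) 0)) PySem.Dict.empty
  d.items

-- ===== PRECONDITION & SPEC =====
def Spec_build_user_intents (user_text : String) (intent_dict : List (String × List String)) (out : List (String × Int)) : Prop := out = build_user_intents_alt user_text intent_dict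
instance (user_text : String) (intent_dict : List (String × List String)) (out : List (String × Int)) : Decidable (Spec_build_user_intents user_text intent_dict out) := by unfold Spec_build_user_intents; infer_instance

-- ===== CLAIM (what is proved, stated in full; the proofs are below) =====
def Claim_equal_build_user_intents : Prop := ∀ (user_text : String) (intent_dict : List (String × List String)), Dom_build_user_intents user_text intent_dict → Spec_build_user_intents user_text intent_dict (build_user_intents user_text intent_dict)

-- ===== LEMMAS AND PROOFS =====

-- membership in the substring set ↔ Python's `k in u`, for any keyword whose length is listed
lemma contains_subs_eq (u : String) (ls : List Int) (k : String)
    (h0 : ∀ L ∈ ls, 0 ≤ L) (hk : PySem.Str.len k ∈ ls) :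
    PySem.Set.contains
      (PySem.Set.ofList ((PySem.Set.ofList ls).flatMap (fun L =>
        (PySem.List.pyRange 0 (PySem.Str.len u - L + 1) 1).map
          (fun i => PySem.Str.slice u (some i) (some (i + L)))))) k
    = PySem.Str.isIn k u := by
  have hmem : (k ∈ PySem.Set.ofList ((PySem.Set.ofList ls).flatMap (fun L =>
        (PySem.List.pyRange 0 (PySem.Str.len u - L + 1) 1).map
          (fun i => PySem.Str.slice u (some i) (some (i + L)))))) ↔ PySem.Str.isIn k u = true := by
    rw [PySem.Set.mem_ofList, List.mem_flatMap]
    constructor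
    · rintro ⟨L, hL, hk'⟩
      rw [List.mem_map] at hk'
      obtain ⟨i, hi, rfl⟩ := hk'
      rw [PySem.List.mem_pyRange_one] at hi
      have hL0 : 0 ≤ L := h0 L ((PySem.Set.mem_ofList ls L).mp hL)
      -- the slice is an infix of u
      rw [PySem.Str.isIn_iff_infix]
      have hsl : (PySem.Str.slice u (some i) (some (i + L))).toList
          = List.take L.toNat (List.drop i.toNat u.toList) := by
        have : PySem.List.slice u.toList (some ((i.toNat : Nat) : Int))
            (some (((i.toNat : Nat) : Int) + ((L.toNat : Nat) : Int)))
            = List.take L.toNat (List.drop i.toNat u.toList) :=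
          PySem.List.slice_natCast_add u.toList i.toNat L.toNat
        simp only [PySem.Str.slice, PySem.Chars.slice_eq_listSlice]
        rw [Int.toNat_of_nonneg hi.1] at this
        rw [Int.toNat_of_nonneg hL0] at this
        simpa using this
      rw [hsl]
      exact ((List.take_prefix _ _).isInfix).trans ((List.drop_suffix _ _).isInfix)
    · intro hin
      have := (PySem.Chars.exists_prefix_drop_iff_isIn k.toList u.toList).mpr (by
        have : PySem.Str.isIn k u = PySem.Chars.isIn k.toList u.toList := by
          simp [PySem.Str.isIn_eq]
        rwa [this] at hin)
      obtain ⟨j, hj⟩ := this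
      set m := k.toList.length with hm
      set nn := u.toList.length with hn
      -- choose a witness start inside the range
      have key : ∃ j' : Nat, j' + m ≤ nn ∧ k.toList <+: List.drop j' u.toList := by
        by_cases hle : j ≤ nn
        · refine ⟨j, ?_, hj⟩
          have := hj.length_le
          simp only [List.length_drop] at this
          omega
        · have : List.drop j u.toList = [] := List.drop_eq_nil_of_le (by omega)
          rw [this, List.prefix_nil] at hj
          refine ⟨0, ?_, by simp [hj]⟩
          have : m = 0 := by simp [hm, hj]
          omega
      obtain ⟨j', hjle, hpre⟩ := key
      refine ⟨PySem.Str.len k, (PySem.Set.mem_ofList ls _).mpr hk, ?_⟩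
      rw [List.mem_map]
      refine ⟨(j' : Int), ?_, ?_⟩
      · rw [PySem.List.mem_pyRange_one]
        constructor
        · exact_mod_cast Nat.zero_le j'
        · rw [PySem.Str.len_eq, PySem.Str.len_eq]
          omega
      · apply String.toList_inj.mp
        have hsl : (PySem.Str.slice u (some (j' : Int)) (some ((j' : Int) + PySem.Str.len k))).toList
            = List.take m (List.drop j' u.toList) := by
          simp only [PySem.Str.slice, PySem.Chars.slice_eq_listSlice, PySem.Str.len_eq, hm]
          simpa using PySem.List.slice_natCast_add u.toList j' m
        rw [hsl]
        exact ((List.prefix_iff_eq_take.mp hpre).symm)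
  cases hin : PySem.Str.isIn k u with
  | true => exact (PySem.Set.contains_iff _ _).mpr (hmem.mpr hin)
  | false =>
    rw [Bool.eq_false_iff]
    intro hc
    have := hmem.mp ((PySem.Set.contains_iff _ _).mp hc)
    rw [hin] at this
    exact absurd this (by simp)

-- ===== VERDICT (by name: the statement is the Claim_ definition above) =====
theorem build_user_intents_spec : Claim_equal_build_user_intents := by
  intro u intent_dict _
  unfold Spec_build_user_intents build_user_intents build_user_intents_alt
  simp only []
  congr 1
  apply PySem.List.foldl_congr_mem
  intro d p hp
  congr 1
  apply PySem.List.foldl_congr_mem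
  intro acc k hk
  rw [contains_subs_eq u (intent_dict.flatMap (fun p => p.2.map (fun k => PySem.Str.len k))) k]
  · cases PySem.Str.isIn k u <;> simp
  · intro L hL
    rw [List.mem_flatMap] at hL
    obtain ⟨q, _, hq⟩ := hL
    rw [List.mem_map] at hq
    obtain ⟨k', _, rfl⟩ := hq
    rw [PySem.Str.len_eq]
    positivity
  · rw [List.mem_flatMap]
    exact ⟨p, hp, List.mem_map.mpr ⟨k, hk, rfl⟩⟩
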